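-- pv_equiv track=rewrite | github.com/wseungjin/codingTest | programmars/binarySearch/1.py | bs
-- ===== SOURCE A (Python) =====
-- def bs(n,times,left,right):
--     if(left>right):
--         return left
--
--     mid = (left + right) // 2
--
--     sumValue = 0
--     for i in range(len(times)):
--         sumValue += mid//times[i]
--
--     if sumValue >= n:
--         return bs(n,times,left,mid-1)
--     elif sumValue < n:
--         return bs(n,times,mid+1,right)
-- ===== SOURCE B (Python) =====
-- def bs(n, times, left, right):
--     def enough(x):
--         return sum(x // t for t in times) >= n
--
--     def step(lo, hi):
--         mid = (lo + hi) // 2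
--         return (lo, mid - 1) if enough(mid) else (mid + 1, hi)
--
--     state = (left, right)
--     while state[0] <= state[1]:
--         state = step(*state)
--     return state[0]
-- ===== Notes on version B (the rewrite author's own statement) =====
-- stated objective: idiomatic
-- what changed: Replaced the tail recursion with an iterative loop over an explicit (lo, hi) state pair, factored the acceptance test into an enough(x) predicate computed with sum() over the times directly, and the window-shrinking move into a step function returning the next state pair.
import Mathlib
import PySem

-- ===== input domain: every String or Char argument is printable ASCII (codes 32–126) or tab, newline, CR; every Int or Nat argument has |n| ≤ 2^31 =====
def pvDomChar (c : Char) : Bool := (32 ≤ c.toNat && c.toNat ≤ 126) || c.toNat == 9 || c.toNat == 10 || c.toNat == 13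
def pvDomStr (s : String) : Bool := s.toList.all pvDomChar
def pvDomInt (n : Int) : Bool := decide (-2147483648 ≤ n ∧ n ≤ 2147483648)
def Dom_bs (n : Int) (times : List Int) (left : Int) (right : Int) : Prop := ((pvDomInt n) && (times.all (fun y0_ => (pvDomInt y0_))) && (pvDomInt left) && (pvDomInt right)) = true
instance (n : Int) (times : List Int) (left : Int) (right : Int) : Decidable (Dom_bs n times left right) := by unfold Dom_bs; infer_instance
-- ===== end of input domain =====

-- B replaces the tail recursion by an iterative loop over an explicit (lo, hi) state pair,
-- with the acceptance test factored into an 'enough' predicate (sum() over times directly)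
-- and the window move into a 'step' function; idiomatic, same asymptotic cost.


-- ===== PORT A =====
-- literal port of A: recursion; the for loop over range(len(times)) with indexing times[i]
def bs (n : Int) (times : List Int) (left : Int) (right : Int) : Int :=
  if h : left > right then left
  else
    let mid := PySem.Int.floordiv (left + right) 2
    let sumValue := (PySem.List.pyRange 0 times.length 1).foldl
      (fun acc i => acc + PySem.Int.floordiv mid (PySem.List.pyGetD times i 0)) 0
    if sumValue ≥ n then bs n times left (mid - 1)
    else bs n times (mid + 1) right
termination_by (right - left + 1).toNat
decreasing_by
  · have := PySem.Int.floordiv_two_mid_bounds (lo := left) (hi := right) (by omega)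
    omega
  · have := PySem.Int.floordiv_two_mid_bounds (lo := left) (hi := right) (by omega)
    omega

-- ===== PORT B =====
-- B's helper enough(x): sum(x // t for t in times) >= n
def bsEnough (n : Int) (times : List Int) (x : Int) : Bool :=
  (times.map (fun t => PySem.Int.floordiv x t)).sum ≥ n

-- B's helper step(lo, hi): one window move, returning the next state pair
def bsStep (n : Int) (times : List Int) (s : Int × Int) : Int × Int :=
  let mid := PySem.Int.floordiv (s.1 + s.2) 2
  if bsEnough n times mid then (s.1, mid - 1) else (mid + 1, s.2)

-- equation lemmas for bsStep (used for termination and for the equivalence proof)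
theorem bsStep_pos (n : Int) (times : List Int) (s : Int × Int)
    (hb : bsEnough n times (PySem.Int.floordiv (s.1 + s.2) 2) = true) :
    bsStep n times s = (s.1, PySem.Int.floordiv (s.1 + s.2) 2 - 1) := by
  unfold bsStep
  show (if bsEnough n times (PySem.Int.floordiv (s.1 + s.2) 2) = true
        then (s.1, PySem.Int.floordiv (s.1 + s.2) 2 - 1)
        else (PySem.Int.floordiv (s.1 + s.2) 2 + 1, s.2)) = _
  rw [if_pos hb]

theorem bsStep_neg (n : Int) (times : List Int) (s : Int × Int)
    (hb : bsEnough n times (PySem.Int.floordiv (s.1 + s.2) 2) = false) :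
    bsStep n times s = (PySem.Int.floordiv (s.1 + s.2) 2 + 1, s.2) := by
  unfold bsStep
  show (if bsEnough n times (PySem.Int.floordiv (s.1 + s.2) 2) = true
        then (s.1, PySem.Int.floordiv (s.1 + s.2) 2 - 1)
        else (PySem.Int.floordiv (s.1 + s.2) 2 + 1, s.2)) = _
  rw [if_neg (by rw [hb]; exact Bool.false_ne_true)]

-- the state pair strictly shrinks at each step of the loop (used for termination below)
theorem bsStep_shrinks (n : Int) (times : List Int) (s : Int × Int) (h : s.1 ≤ s.2) :
    ((bsStep n times s).2 - (bsStep n times s).1 + 1).toNat < (s.2 - s.1 + 1).toNat := by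
  have := PySem.Int.floordiv_two_mid_bounds (lo := s.1) (hi := s.2) h
  cases hb : bsEnough n times (PySem.Int.floordiv (s.1 + s.2) 2) with
  | true => rw [bsStep_pos n times s hb]; simp; omega
  | false => rw [bsStep_neg n times s hb]; simp; omega

-- B's while loop over the state pair
def bsRun (n : Int) (times : List Int) (s : Int × Int) : Int :=
  if h : s.1 ≤ s.2 then bsRun n times (bsStep n times s) else s.1
termination_by (s.2 - s.1 + 1).toNat
decreasing_by exact bsStep_shrinks n times s h

def bs_alt (n : Int) (times : List Int) (left : Int) (right : Int) : Int :=
  bsRun n times (left, right)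

-- ===== PRECONDITION & SPEC =====
-- Pre_ excludes exactly the inputs where A raises ZeroDivisionError: a 0 in times with the
-- search window nonempty (left ≤ right), so the division loop runs.
def Pre_bs (n : Int) (times : List Int) (left : Int) (right : Int) : Prop :=
  right < left ∨ (0 : Int) ∉ times
instance (n : Int) (times : List Int) (left : Int) (right : Int) : Decidable (Pre_bs n times left right) := by unfold Pre_bs; infer_instance

def pvWitness_bs : Int × List Int × Int × Int := (6, [1, 2, 3], 1, 10)

def Spec_bs (n : Int) (times : List Int) (left : Int) (right : Int) (out : Int) : Prop := out = bs_alt n times left right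
instance (n : Int) (times : List Int) (left : Int) (right : Int) (out : Int) : Decidable (Spec_bs n times left right out) := by unfold Spec_bs; infer_instance

-- ===== CLAIM (what is proved, stated in full; the proofs are below) =====
def Claim_equal_bs : Prop := ∀ (n : Int) (times : List Int) (left : Int) (right : Int), Dom_bs n times left right → Pre_bs n times left right → Spec_bs n times left right (bs n times left right)

-- ===== LEMMAS AND PROOFS =====

-- A's indexed summation loop equals B's map-and-sum over times
theorem bs_sum_eq (mid : Int) (times : List Int) :
    (PySem.List.pyRange 0 times.length 1).foldl
      (fun acc i => acc + PySem.Int.floordiv mid (PySem.List.pyGetD times i 0)) 0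
    = (times.map (fun t => PySem.Int.floordiv mid t)).sum := by
  rw [PySem.List.foldl_pyRange_zero_pyGetD' (f := fun acc t => acc + PySem.Int.floordiv mid t)
    (xs := times) (d := 0) (init := 0)]
  induction times using List.reverseRecOn with
  | nil => simp
  | append_singleton xs x ih => simp [ih]

theorem bs_eq_run (n : Int) (times : List Int) (left : Int) (right : Int) :
    bs n times left right = bsRun n times (left, right) := by
  fun_induction bs n times left right with
  | case1 left right h =>
    rw [bsRun]
    simp [show ¬ (left ≤ right) by omega]
  | case2 left right h mid sumValue hge ih =>
    rw [bsRun, dif_pos (show left ≤ right by omega)]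
    have hb : bsEnough n times (PySem.Int.floordiv (left + right) 2) = true := by
      simp only [bsEnough, decide_eq_true_eq, ← bs_sum_eq]; exact hge
    rw [bsStep_pos n times (left, right) hb]
    exact ih
  | case3 left right h mid sumValue hlt ih =>
    rw [bsRun, dif_pos (show left ≤ right by omega)]
    have hb : bsEnough n times (PySem.Int.floordiv (left + right) 2) = false := by
      simp only [bsEnough, decide_eq_false_iff_not, ← bs_sum_eq]; exact hlt
    rw [bsStep_neg n times (left, right) hb]
    exact ih

-- ===== VERDICT (by name: the statement is the Claim_ definition above) =====
theorem bs_spec : Claim_equal_bs := by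
  intro n times left right _ _
  unfold Spec_bs bs_alt
  exact bs_eq_run n times left right
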